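-- pv_equiv track=rewrite | github.com/jjjch0723/CoddingTest | 프로그래머스/0/181896. 첫 번째로 나오는 음수/첫 번째로 나오는 음수.py | solution
-- ===== SOURCE A (Python) =====
-- def solution(num_list):
--     answer = 0
--     for i in num_list:
--         if i > 0 :
--             answer += 1
--         elif i < 0:
--             return answer
--
--     return -1
-- ===== SOURCE B (Python) =====
-- def solution(num_list):
--     idx = next((i for i, x in enumerate(num_list) if x < 0), None)
--     if idx is None:
--         return -1
--     return sum(1 for x in num_list[:idx] if x > 0)
-- ===== Notes on version B (the rewrite author's own statement) =====
-- stated objective: alternative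
-- what changed: B separates boundary-finding from counting: it first locates the index of the first negative element (next over an enumerate generator), returns -1 if none, and then counts positives in the prefix before that index, instead of A's single interleaved accumulator loop.
import Mathlib
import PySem

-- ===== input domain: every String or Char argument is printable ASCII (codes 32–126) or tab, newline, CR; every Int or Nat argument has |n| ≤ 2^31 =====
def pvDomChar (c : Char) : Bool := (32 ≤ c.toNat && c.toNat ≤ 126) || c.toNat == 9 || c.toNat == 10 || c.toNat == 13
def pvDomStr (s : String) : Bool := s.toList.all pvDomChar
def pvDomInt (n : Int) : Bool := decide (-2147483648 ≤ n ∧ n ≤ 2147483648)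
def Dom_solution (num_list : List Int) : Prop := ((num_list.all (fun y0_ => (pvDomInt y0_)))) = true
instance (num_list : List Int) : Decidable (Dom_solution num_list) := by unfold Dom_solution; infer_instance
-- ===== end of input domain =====

-- B is an alternative decomposition: find the first-negative index, then count positives in that prefix.

-- ===== PORT A =====
-- A's single accumulator loop: count positives, return the count at the first negative, else -1.
def solutionGo (l : List Int) (answer : Int) : Int :=
  match l with
  | [] => -1
  | i :: rest =>
    if i > 0 then solutionGo rest (answer + 1)
    else if i < 0 then answer
    else solutionGo rest answer

def solution (num_list : List Int) : Int := solutionGo num_list 0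

-- ===== PORT B =====
-- B: index of first negative (none → -1), then count positives strictly before it.
def solution_alt (num_list : List Int) : Int :=
  match num_list.findIdx? (fun x => x < 0) with
  | none => -1
  | some i => (((num_list.take i).filter (fun x => x > 0)).length : Int)

-- ===== PRECONDITION & SPEC =====
def Spec_solution (num_list : List Int) (out : Int) : Prop := out = solution_alt num_list
instance (num_list : List Int) (out : Int) : Decidable (Spec_solution num_list out) := by unfold Spec_solution; infer_instance

-- ===== CLAIM (what is proved, stated in full; the proofs are below) =====
def Claim_equal_solution : Prop := ∀ (num_list : List Int), Dom_solution num_list → Spec_solution num_list (solution num_list)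

-- ===== LEMMAS AND PROOFS =====

theorem solutionGo_eq (l : List Int) (a : Int) :
    solutionGo l a =
      match l.findIdx? (fun x => x < 0) with
      | none => -1
      | some i => a + (((l.take i).filter (fun x => x > 0)).length : Int) := by
  induction l generalizing a with
  | nil => simp [solutionGo]
  | cons x xs ih =>
    by_cases hx : x < 0
    · have hx' : ¬ x > 0 := by omega
      simp [solutionGo, hx, hx', List.findIdx?_cons]
    · by_cases hp : x > 0
      · have : ¬ (fun x => decide (x < 0)) x = true := by simpa using hx
        simp only [solutionGo, if_pos hp, List.findIdx?_cons, this, ih]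
        cases h : xs.findIdx? (fun x => x < 0) with
        | none => simp
        | some i =>
          simp [List.take_succ_cons, hp]
          ring
      · have : ¬ (fun x => decide (x < 0)) x = true := by simpa using hx
        simp only [solutionGo, if_neg hp, if_neg hx, List.findIdx?_cons, this, ih]
        cases h : xs.findIdx? (fun x => x < 0) with
        | none => simp
        | some i => simp [List.take_succ_cons, hp]

-- ===== VERDICT (by name: the statement is the Claim_ definition above) =====
theorem solution_spec : Claim_equal_solution := by
  intro l _
  show solution l = solution_alt l
  simp only [solution, solution_alt, solutionGo_eq]
  cases l.findIdx? (fun x => x < 0) <;> simp
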